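-- pv_equiv track=rewrite | github.com/FengJingLiu/bayes_poker | src/bayes_poker/storage/position.py | compute_relative_position
-- ===== SOURCE A (Python) =====
-- POSITIONS_6MAX = ["BTN", "SB", "BB", "UTG", "MP", "CO"]
--
-- POSITIONS_5MAX = ["BTN", "SB", "BB", "UTG", "CO"]
--
-- POSITIONS_4MAX = ["BTN", "SB", "BB", "UTG"]
--
-- POSITIONS_3MAX = ["BTN", "SB", "BB"]
--
-- POSITIONS_2MAX = ["BTN", "BB"]
--
-- def get_position_list(player_count: int) -> list[str]:
--     if player_count >= 6:
--         return POSITIONS_6MAX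
--     elif player_count == 5:
--         return POSITIONS_5MAX
--     elif player_count == 4:
--         return POSITIONS_4MAX
--     elif player_count == 3:
--         return POSITIONS_3MAX
--     else:
--         return POSITIONS_2MAX
--
-- def compute_relative_position(
--     seat_no: int,
--     button_seat: int,
--     seat_count: int,
--     occupied_seats: list[int],
-- ) -> str | None:
--     """
--     计算玩家的相对位置。
--
--     Args:
--         seat_no: 玩家座位号 (1-based)
--         button_seat: 按钮位座位号 (1-based)
--         seat_count: 最大座位数
--         occupied_seats: 所有在座玩家的座位号列表
--
--     Returns:
--         相对位置字符串 (BTN/SB/BB/UTG/MP/CO)，若无法计算返回 None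
--     """
--     if not occupied_seats or button_seat not in occupied_seats:
--         return None
--
--     sorted_seats = sorted(occupied_seats)
--     player_count = len(sorted_seats)
--     positions = get_position_list(player_count)
--
--     btn_index = sorted_seats.index(button_seat)
--
--     ordered_seats = []
--     for i in range(player_count):
--         idx = (btn_index + i) % player_count
--         ordered_seats.append(sorted_seats[idx])
--
--     if seat_no not in ordered_seats:
--         return None
--
--     position_index = ordered_seats.index(seat_no)
--
--     if position_index < len(positions):
--         return positions[position_index]
--
--     return None
-- ===== SOURCE B (Python) =====
-- POSITIONS_6MAX = ["BTN", "SB", "BB", "UTG", "MP", "CO"]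
-- POSITIONS_5MAX = ["BTN", "SB", "BB", "UTG", "CO"]
-- POSITIONS_4MAX = ["BTN", "SB", "BB", "UTG"]
-- POSITIONS_3MAX = ["BTN", "SB", "BB"]
-- POSITIONS_2MAX = ["BTN", "BB"]
--
-- def get_position_list(player_count: int) -> list[str]:
--     if player_count >= 6:
--         return POSITIONS_6MAX
--     elif player_count == 5:
--         return POSITIONS_5MAX
--     elif player_count == 4:
--         return POSITIONS_4MAX
--     elif player_count == 3:
--         return POSITIONS_3MAX
--     else:
--         return POSITIONS_2MAX
--
-- def compute_relative_position(
--     seat_no: int,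
--     button_seat: int,
--     seat_count: int,
--     occupied_seats: list[int],
-- ) -> str | None:
--     # Closed-form: the rank of a seat (number of strictly smaller occupied seats)
--     # replaces sorting, the rotation loop and both .index scans.
--     if not occupied_seats or button_seat not in occupied_seats:
--         return None
--     if seat_no not in occupied_seats:
--         return None
--     player_count = len(occupied_seats)
--     positions = get_position_list(player_count)
--     rank_seat = sum(1 for s in occupied_seats if s < seat_no)
--     rank_btn = sum(1 for s in occupied_seats if s < button_seat)
--     position_index = (rank_seat - rank_btn) % player_count
--     return positions[position_index] if position_index < len(positions) else None
-- ===== Notes on version B (the rewrite author's own statement) =====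
-- stated objective: simpler
-- what changed: Replaced the sort, the rotation-building loop and both list.index scans by a closed-form position index: (count of occupied seats below seat_no minus count below button_seat) mod player_count, after an explicit membership check for seat_no.
import Mathlib
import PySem

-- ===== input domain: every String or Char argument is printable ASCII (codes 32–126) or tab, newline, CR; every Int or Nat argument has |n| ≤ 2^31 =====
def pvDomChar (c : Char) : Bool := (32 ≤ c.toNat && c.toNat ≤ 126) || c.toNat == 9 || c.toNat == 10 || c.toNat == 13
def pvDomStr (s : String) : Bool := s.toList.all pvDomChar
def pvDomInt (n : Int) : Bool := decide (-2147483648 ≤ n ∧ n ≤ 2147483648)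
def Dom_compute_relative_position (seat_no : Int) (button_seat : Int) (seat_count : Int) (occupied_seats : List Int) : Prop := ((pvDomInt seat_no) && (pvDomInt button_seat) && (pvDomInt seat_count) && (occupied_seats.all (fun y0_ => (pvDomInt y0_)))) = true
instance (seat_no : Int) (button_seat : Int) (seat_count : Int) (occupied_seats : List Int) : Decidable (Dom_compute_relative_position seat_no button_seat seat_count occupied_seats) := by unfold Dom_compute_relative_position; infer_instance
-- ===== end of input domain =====

-- B replaces A's sort + rotation loop + two .index scans by a closed-form rank computation; proven to return the same value on all inputs.


-- ===== PORT A =====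
-- helper shared by both Python files (A and B import the identical get_position_list)
def get_position_list (player_count : Int) : List String :=
  if player_count ≥ 6 then ["BTN", "SB", "BB", "UTG", "MP", "CO"]
  else if player_count = 5 then ["BTN", "SB", "BB", "UTG", "CO"]
  else if player_count = 4 then ["BTN", "SB", "BB", "UTG"]
  else if player_count = 3 then ["BTN", "SB", "BB"]
  else ["BTN", "BB"]

def compute_relative_position (seat_no : Int) (button_seat : Int) (seat_count : Int) (occupied_seats : List Int) : Option String :=
  if occupied_seats = [] ∨ button_seat ∉ occupied_seats then none
  else
    let sorted_seats := PySem.List.sorted occupied_seats id false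
    let player_count := sorted_seats.length
    let positions := get_position_list (player_count : Int)
    -- button_seat ∈ sorted_seats here, so .index returns; .getD 0 is never the default
    let btn_index := (PySem.List.index? sorted_seats button_seat).getD 0
    let ordered_seats := (PySem.List.pyRange 0 (player_count : Int) 1).foldl
        (fun acc i => acc ++ [PySem.List.pyGetD sorted_seats (PySem.Int.mod ((btn_index : Int) + i) (player_count : Int)) 0]) []
    if seat_no ∉ ordered_seats then none
    else
      -- seat_no ∈ ordered_seats here, so .index returns; .getD 0 is never the default
      let position_index := (PySem.List.index? ordered_seats seat_no).getD 0
      if (position_index : Int) < (positions.length : Int) then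
        some (PySem.List.pyGetD positions (position_index : Int) "")
      else none

-- ===== PORT B =====
def compute_relative_position_alt (seat_no : Int) (button_seat : Int) (seat_count : Int) (occupied_seats : List Int) : Option String :=
  if occupied_seats = [] ∨ button_seat ∉ occupied_seats then none
  else if seat_no ∉ occupied_seats then none
  else
    let player_count := occupied_seats.length
    let positions := get_position_list (player_count : Int)
    -- sum(1 for s in occupied_seats if s < x)  =  countP (· < x)
    let rank_seat := occupied_seats.countP (fun s => s < seat_no)
    let rank_btn := occupied_seats.countP (fun s => s < button_seat)
    let position_index := PySem.Int.mod ((rank_seat : Int) - (rank_btn : Int)) (player_count : Int)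
    if position_index < (positions.length : Int) then
      some (PySem.List.pyGetD positions position_index "")
    else none

-- ===== PRECONDITION & SPEC =====
def Spec_compute_relative_position (seat_no : Int) (button_seat : Int) (seat_count : Int) (occupied_seats : List Int) (out : Option String) : Prop := out = compute_relative_position_alt seat_no button_seat seat_count occupied_seats
instance (seat_no : Int) (button_seat : Int) (seat_count : Int) (occupied_seats : List Int) (out : Option String) : Decidable (Spec_compute_relative_position seat_no button_seat seat_count occupied_seats out) := by unfold Spec_compute_relative_position; infer_instance

-- ===== CLAIM (what is proved, stated in full; the proofs are below) =====
def Claim_equal_compute_relative_position : Prop := ∀ (seat_no : Int) (button_seat : Int) (seat_count : Int) (occupied_seats : List Int), Dom_compute_relative_position seat_no button_seat seat_count occupied_seats → Spec_compute_relative_position seat_no button_seat seat_count occupied_seats (compute_relative_position seat_no button_seat seat_count occupied_seats)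

-- ===== LEMMAS AND PROOFS =====

-- index of v in l ++ t when v is not in l
theorem index?_append_of_not_mem {t : List Int} (l : List Int) (v : Int) (h : v ∉ l) :
    PySem.List.index? (l ++ t) v = (PySem.List.index? t v).map (l.length + ·) := by
  induction l with
  | nil => simp [Option.map_id']
  | cons x xs ih =>
    simp only [List.mem_cons, not_or] at h
    rw [List.cons_append, PySem.List.index?_cons_of_ne _ (fun hx => h.1 hx.symm), ih h.2]
    cases PySem.List.index? t v <;> simp
    omega

-- in a weakly sorted list, the first index of a member equals the number of strictly smaller elements
theorem sorted_index_countP (L : List Int) (hp : L.Pairwise (· ≤ ·)) (v : Int) (hv : v ∈ L) :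
    PySem.List.index? L v = some (L.countP (fun s => s < v)) := by
  induction L with
  | nil => simp at hv
  | cons x xs ih =>
    rcases List.pairwise_cons.mp hp with ⟨hx, hp'⟩
    by_cases hxv : x = v
    · subst hxv
      rw [PySem.List.index?_cons_self]
      have : (x :: xs).countP (fun s => s < x) = 0 := by
        rw [List.countP_eq_zero]
        intro a ha
        simp only [List.mem_cons] at ha
        rcases ha with rfl | ha
        · simp
        · simpa using not_lt.mpr (hx a ha)
      simp [this]
    · have hv' : v ∈ xs := by
        rcases List.mem_cons.mp hv with rfl | h
        · exact absurd rfl hxv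
        · exact h
      rw [PySem.List.index?_cons_of_ne _ hxv, ih hp' hv']
      have hxlt : x < v := lt_of_le_of_ne (hx v hv') hxv
      simp [hxlt]

-- a member is not counted among the strictly smaller elements
theorem countP_lt_length (L : List Int) (v : Int) (hv : v ∈ L) :
    L.countP (fun s => s < v) < L.length := by
  induction L with
  | nil => simp at hv
  | cons x xs ih =>
    have hle : xs.countP (fun s => s < v) ≤ xs.length := List.countP_le_length
    rw [List.countP_cons, List.length_cons]
    rcases List.mem_cons.mp hv with rfl | h
    · simp; omega
    · have h2 := ih h
      split <;> omega

-- first index of a member v in the sorted list rotated to start at the button's first index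
theorem rotate_index (L : List Int) (hp : L.Pairwise (· ≤ ·)) (button v : Int)
    (hb : button ∈ L) (hv : v ∈ L) :
    PySem.List.index? (L.rotate (L.countP (fun s => s < button))) v =
      some (if L.countP (fun s => s < button) ≤ L.countP (fun s => s < v)
            then L.countP (fun s => s < v) - L.countP (fun s => s < button)
            else L.length - L.countP (fun s => s < button) + L.countP (fun s => s < v)) := by
  set cb := L.countP (fun s => s < button) with hcb
  set rv := L.countP (fun s => s < v) with hrv
  have hcbl : cb < L.length := countP_lt_length L button hb
  obtain ⟨preB, sufB, hLB, hlenB, hnB⟩ :=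
    (PySem.List.index?_eq_some_iff L button cb).mp (sorted_index_countP L hp button hb)
  obtain ⟨pre, suf, hLv, hlenv, hnv⟩ :=
    (PySem.List.index?_eq_some_iff L v rv).mp (sorted_index_countP L hp v hv)
  rw [List.rotate_eq_drop_append_take (le_of_lt hcbl)]
  by_cases hcase : cb ≤ rv
  · -- v lies in the dropped part
    have hdrop : L.drop cb = pre.drop cb ++ v :: suf := by
      rw [hLv, List.drop_append, show cb - pre.length = 0 by omega, List.drop_zero]
    have hvmem : v ∈ L.drop cb := by rw [hdrop]; simp
    rw [PySem.List.index?_append_of_mem _ hvmem, hdrop,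
        index?_append_of_not_mem _ v (fun h => hnv (List.mem_of_mem_drop h)),
        PySem.List.index?_cons_self]
    simp [if_pos hcase]
    omega
  · -- v lies in the taken part
    have htake : L.take cb = pre ++ v :: suf.take (cb - rv - 1) := by
      rw [hLv, List.take_append, show pre.take cb = pre from
            List.take_of_length_le (by omega)]
      congr 1
      rw [List.take_cons (by omega)]
      congr 2
      omega
    have hvpre : v ∈ L.take cb := by rw [htake]; simp
    have htakeB : L.take cb = preB := by rw [hLB, ← hlenB, List.take_left]
    have hdropB : L.drop cb = button :: sufB := by rw [hLB, ← hlenB, List.drop_left]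
    have hnot : v ∉ L.drop cb := by
      intro hmem
      rw [hdropB] at hmem
      have hpw := hLB ▸ hp
      rw [List.pairwise_append] at hpw
      have h1 : v ≤ button := hpw.2.2 v (htakeB ▸ hvpre) button (by simp)
      have h2 : button ≤ v := by
        rcases List.mem_cons.mp hmem with rfl | hs
        · exact le_refl _
        · exact (List.pairwise_cons.mp hpw.2.1).1 v hs
      exact hnB ((le_antisymm h1 h2) ▸ htakeB ▸ hvpre)
    rw [index?_append_of_not_mem _ v hnot, htake,
        index?_append_of_not_mem _ v hnv, PySem.List.index?_cons_self]
    simp [if_neg hcase]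
    omega

-- A's rotation-building loop produces List.rotate
theorem ordered_eq_rotate (L : List Int) (b : Nat) (hlen : 0 < L.length) :
    (PySem.List.pyRange 0 (L.length : Int) 1).foldl
      (fun acc i => acc ++ [PySem.List.pyGetD L (PySem.Int.mod ((b : Int) + i) ((L.length : Nat) : Int)) 0]) []
    = L.rotate b := by
  rw [PySem.List.foldl_append_singleton_eq_map
        (fun i => PySem.List.pyGetD L (PySem.Int.mod ((b : Int) + i) ((L.length : Nat) : Int)) 0),
      PySem.List.pyRange_zero_nat, List.map_map, List.nil_append]
  apply List.ext_getElem
  · simp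
  · intro k h1 h2
    simp only [List.getElem_map, List.getElem_range, Function.comp_apply]
    rw [show ((b : Int) + ((k : Nat) : Int)) = (((b + k : Nat) : Nat) : Int) by push_cast; ring,
        PySem.Int.mod_natCast, PySem.List.pyGetD_natCast,
        List.getD_eq_getElem _ _ (Nat.mod_lt _ (by omega)),
        List.getElem_rotate, Nat.add_comm b k]

-- Python's int mod of the rank difference, as a Nat
theorem int_mod_sub (rv cb n : Nat) (hr : rv < n) (hc : cb < n) :
    PySem.Int.mod ((rv : Int) - (cb : Int)) (n : Int) =
      ((if cb ≤ rv then rv - cb else n - cb + rv : Nat) : Int) := by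
  rw [PySem.Int.mod_eq_emod_of_pos (by omega)]
  split
  · rw [Int.emod_eq_of_lt (by omega) (by omega)]; omega
  · rw [show (rv : Int) - cb = ((n - cb + rv : Nat) : Int) + (n : Int) * (-1) by push_cast; omega,
      Int.add_mul_emod_self_left, Int.emod_eq_of_lt (by push_cast; omega) (by push_cast; omega)]

-- ===== VERDICT (by name: the statement is the Claim_ definition above) =====
theorem compute_relative_position_spec : Claim_equal_compute_relative_position := by
  intro seat_no button_seat seat_count occ _
  unfold Spec_compute_relative_position
  unfold compute_relative_position compute_relative_position_alt
  by_cases h0 : occ = [] ∨ button_seat ∉ occ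
  · simp [h0]
  · rw [if_neg h0, if_neg h0]
    simp only [not_or, not_not] at h0
    obtain ⟨hne, hbm⟩ := h0
    have hlen0 : 0 < occ.length := List.length_pos_iff.mpr hne
    have hperm : (PySem.List.sorted occ id false).Perm occ := PySem.List.sorted_perm occ id false
    have hp : (PySem.List.sorted occ id false).Pairwise (· ≤ ·) :=
      PySem.List.sorted_pairwise occ id
    have hLlen : (PySem.List.sorted occ id false).length = occ.length := hperm.length_eq
    have hbmL : button_seat ∈ PySem.List.sorted occ id false := hperm.mem_iff.mpr hbm
    have hcntb : (PySem.List.sorted occ id false).countP (fun s => s < button_seat)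
        = occ.countP (fun s => s < button_seat) := hperm.countP_eq _
    have hcnts : (PySem.List.sorted occ id false).countP (fun s => s < seat_no)
        = occ.countP (fun s => s < seat_no) := hperm.countP_eq _
    simp only [sorted_index_countP _ hp _ hbmL, Option.getD_some]
    simp only [ordered_eq_rotate (PySem.List.sorted occ id false)
        ((PySem.List.sorted occ id false).countP (fun s => s < button_seat)) (by omega)]
    by_cases hsm : seat_no ∈ occ
    · have hsmL : seat_no ∈ PySem.List.sorted occ id false := hperm.mem_iff.mpr hsm
      have hsrot : seat_no ∈ (PySem.List.sorted occ id false).rotate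
          ((PySem.List.sorted occ id false).countP (fun s => s < button_seat)) := by
        rw [List.mem_rotate]; exact hsmL
      simp only [if_neg (not_not.mpr hsrot), if_neg (not_not.mpr hsm),
          rotate_index _ hp _ _ hbmL hsmL, Option.getD_some]
      simp only [int_mod_sub (occ.countP (fun s => s < seat_no)) (occ.countP (fun s => s < button_seat))
            occ.length (countP_lt_length _ _ hsm) (countP_lt_length _ _ hbm),
          hcntb, hcnts, hLlen]
    · have hsrot : seat_no ∉ (PySem.List.sorted occ id false).rotate
          ((PySem.List.sorted occ id false).countP (fun s => s < button_seat)) := by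
        rw [List.mem_rotate]; exact fun h => hsm (hperm.mem_iff.mp h)
      simp only [if_pos hsrot, if_pos hsm]
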